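-- pv_equiv track=rewrite | github.com/moongzee/shopping_assistant_pj | agent/graph/shopping_graph.py | _pick_products_by_style_codes
-- ===== SOURCE A (Python) =====
-- from typing import Any, Dict, List, NotRequired, TypedDict
--
-- def _pick_products_by_style_codes(products: List[dict], style_codes: List[str]) -> List[dict]:
--     if not style_codes:
--         return []
--     by_code: Dict[str, dict] = {}
--     for p in products:
--         if not isinstance(p, dict):
--             continue
--         code = p.get("style_code") or p.get("STYLE_CODE")
--         if isinstance(code, str) and code and code not in by_code:
--             by_code[code] = p
--     picked: List[dict] = []
--     for code in style_codes:
--         p = by_code.get(code)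
--         if p:
--             picked.append(p)
--     return picked
-- ===== SOURCE B (Python) =====
-- def _pick_products_by_style_codes(products, style_codes):
--     picked = []
--     for code in style_codes:
--         for p in products:
--             if not isinstance(p, dict):
--                 continue
--             c = p.get("style_code") or p.get("STYLE_CODE")
--             if isinstance(c, str) and c and c == code:
--                 picked.append(p)
--                 break
--     return picked
-- ===== Notes on version B (the rewrite author's own statement) =====
-- stated objective: simpler
-- what changed: Drops the prebuilt code->product dict index entirely: for each requested code B scans products in order and takes the first match (break), maintaining no state between codes; the empty-style_codes guard disappears since the loop is vacuous.
import Mathlib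
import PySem

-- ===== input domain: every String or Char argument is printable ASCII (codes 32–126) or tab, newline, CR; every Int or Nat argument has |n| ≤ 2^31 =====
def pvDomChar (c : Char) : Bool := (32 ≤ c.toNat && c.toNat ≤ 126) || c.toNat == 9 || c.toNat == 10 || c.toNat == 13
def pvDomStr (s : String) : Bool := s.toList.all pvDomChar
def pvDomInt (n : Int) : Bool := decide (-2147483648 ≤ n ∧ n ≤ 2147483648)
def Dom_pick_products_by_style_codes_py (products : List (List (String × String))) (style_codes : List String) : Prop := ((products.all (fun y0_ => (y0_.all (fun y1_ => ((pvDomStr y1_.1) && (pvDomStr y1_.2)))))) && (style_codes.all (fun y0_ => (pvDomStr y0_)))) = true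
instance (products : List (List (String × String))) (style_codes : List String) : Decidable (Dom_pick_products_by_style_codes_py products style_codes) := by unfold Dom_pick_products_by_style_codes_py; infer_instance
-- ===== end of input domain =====

-- B drops A's prebuilt code->product dict: it scans products afresh for each code (first match wins);
-- return values are identical, only the traversal shape differs.

-- shared helper: `p.get("style_code") or p.get("STYLE_CODE")` (None/"" falls through to the second get)
def pvCodeOf (p : List (String × String)) : Option String :=
  match (PySem.Dict.mk p).get? "style_code" with
  | some s => if s = "" then (PySem.Dict.mk p).get? "STYLE_CODE" else some s
  | none => (PySem.Dict.mk p).get? "STYLE_CODE"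

-- ===== PORT A =====
def pick_products_by_style_codes_py (products : List (List (String × String))) (style_codes : List String) : List (List (String × String)) :=
  if style_codes = [] then []
  else
    let by_code : PySem.Dict String (List (String × String)) :=
      products.foldl (fun d p =>
        match pvCodeOf p with
        | some code => if code ≠ "" ∧ d.contains code = false then d.insert code p else d
        | none => d) PySem.Dict.empty
    style_codes.foldl (fun picked code =>
      match by_code.get? code with
      | some p => if p ≠ [] then picked ++ [p] else picked
      | none => picked) []

-- ===== PORT B =====
-- inner `for p in products: … break` = first product whose effective code is non-empty and equals `code`
def pvMatches (code : String) (p : List (String × String)) : Bool :=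
  match pvCodeOf p with
  | some c => !(c == "") && c == code
  | none => false

def pick_products_by_style_codes_py_alt (products : List (List (String × String))) (style_codes : List String) : List (List (String × String)) :=
  style_codes.foldl (fun picked code =>
    match products.find? (pvMatches code) with
    | some p => picked ++ [p]
    | none => picked) []

-- ===== PRECONDITION & SPEC =====
def Spec_pick_products_by_style_codes_py (products : List (List (String × String))) (style_codes : List String) (out : List (List (String × String))) : Prop := out = pick_products_by_style_codes_py_alt products style_codes
instance (products : List (List (String × String))) (style_codes : List String) (out : List (List (String × String))) : Decidable (Spec_pick_products_by_style_codes_py products style_codes out) := by unfold Spec_pick_products_by_style_codes_py; infer_instance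

-- ===== CLAIM (what is proved, stated in full; the proofs are below) =====
def Claim_equal_pick_products_by_style_codes_py : Prop := ∀ (products : List (List (String × String))) (style_codes : List String), Dom_pick_products_by_style_codes_py products style_codes → Spec_pick_products_by_style_codes_py products style_codes (pick_products_by_style_codes_py products style_codes)

-- ===== LEMMAS AND PROOFS =====

-- the dict-building loop's lookup is the first matching product (for non-empty codes)
lemma pv_build_get? (products : List (List (String × String)))
    (d : PySem.Dict String (List (String × String))) (code : String) :
    (products.foldl (fun d p =>
        match pvCodeOf p with
        | some c => if c ≠ "" ∧ d.contains c = false then d.insert c p else d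
        | none => d) d).get? code
    = (d.get? code).or (if code = "" then none else products.find? (pvMatches code)) := by
  induction products generalizing d with
  | nil => by_cases h : code = "" <;> simp [h]
  | cons p ps ih =>
    simp only [List.foldl_cons, ih]
    rcases hc : pvCodeOf p with _ | c
    · have hm : pvMatches code p = false := by simp [pvMatches, hc]
      simp [hm]
    · simp only []
      by_cases hce : c = ""
      · subst hce
        simp [pvMatches, hc]
      · by_cases hct : d.contains c = false
        · simp only [hce, hct, ne_eq, not_false_iff, and_self, if_true]
          by_cases hq : code = c
          · subst hq
            have hd : d.get? code = none := by
              rw [PySem.Dict.contains_eq_isSome_get?] at hct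
              cases h : d.get? code <;> simp [h] at hct ⊢
            simp [PySem.Dict.get?_insert_self, hd, hce, pvMatches, hc]
          · rw [PySem.Dict.get?_insert_of_ne _ _ hq]
            simp only [List.find?_cons]
            have : pvMatches code p = false := by
              simp [pvMatches, hc]
              intro _; exact fun h => hq h.symm
            simp [this]
        · have hct' : d.contains c = true := by
            cases h : d.contains c
            · exact absurd h hct
            · rfl
          simp only [hce, ne_eq, not_false_iff, true_and, hct', Bool.true_eq_false, if_false]
          by_cases hq : code = c
          · subst hq
            have hs : (d.get? code).isSome := by
              rw [PySem.Dict.contains_eq_isSome_get?] at hct'; exact hct'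
            rcases h : d.get? code with _ | v
            · simp [h] at hs
            · simp
          · simp only [List.find?_cons]
            have : pvMatches code p = false := by
              simp [pvMatches, hc]
              intro _; exact fun h => hq h.symm
            simp [this]

-- a matching product is a non-empty dict (pvCodeOf [] = none)
lemma pv_matches_ne_nil {code : String} {p : List (String × String)}
    (h : pvMatches code p = true) : p ≠ [] := by
  rintro rfl
  simp [pvMatches, pvCodeOf, PySem.Dict.get?] at h

-- the per-code bodies of the two folds agree
lemma pv_step_eq (products : List (List (String × String))) (acc : List (List (String × String))) (code : String) :
    (match (products.foldl (fun d p =>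
        match pvCodeOf p with
        | some c => if c ≠ "" ∧ d.contains c = false then d.insert c p else d
        | none => d) PySem.Dict.empty).get? code with
      | some p => if p ≠ [] then acc ++ [p] else acc
      | none => acc)
    = (match products.find? (pvMatches code) with
      | some p => acc ++ [p]
      | none => acc) := by
  rw [pv_build_get?]
  simp only [PySem.Dict.get?_empty, Option.none_or]
  by_cases hce : code = ""
  · subst hce
    have : products.find? (pvMatches "") = none := by
      rw [List.find?_eq_none]
      intro p _
      simp [pvMatches]
      rcases h : pvCodeOf p with _ | c <;> simp
    simp [this]
  · simp only [hce, if_false]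
    rcases h : products.find? (pvMatches code) with _ | p
    · simp
    · have := pv_matches_ne_nil (List.find?_some h)
      simp [this]

-- the whole output folds agree, for every accumulator
lemma pv_fold_eq (products : List (List (String × String))) (cs : List String) (acc : List (List (String × String))) :
    cs.foldl (fun picked code =>
      match (products.foldl (fun d p =>
          match pvCodeOf p with
          | some c => if c ≠ "" ∧ d.contains c = false then d.insert c p else d
          | none => d) PySem.Dict.empty).get? code with
      | some p => if p ≠ [] then picked ++ [p] else picked
      | none => picked) acc
    = cs.foldl (fun picked code =>
      match products.find? (pvMatches code) with
      | some p => picked ++ [p]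
      | none => picked) acc := by
  induction cs generalizing acc with
  | nil => rfl
  | cons c cs ih =>
    simp only [List.foldl_cons]
    rw [pv_step_eq, ih]

-- ===== VERDICT (by name: the statement is the Claim_ definition above) =====
theorem pick_products_by_style_codes_py_spec : Claim_equal_pick_products_by_style_codes_py := by
  intro products style_codes _
  unfold Spec_pick_products_by_style_codes_py pick_products_by_style_codes_py pick_products_by_style_codes_py_alt
  by_cases h : style_codes = []
  · simp [h]
  · simp only [h, if_false]
    exact pv_fold_eq products style_codes []
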